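-- pv_equiv track=rewrite | github.com/thorek1/MacroModelling.jl | analysis/constants_usage_report.py | entrypoints_reaching
-- ===== SOURCE A (Python) =====
-- from collections import defaultdict, deque
-- from typing import Dict, Iterable, List, Optional, Set, Tuple
--
-- def entrypoints_reaching(target: str, rev_graph: Dict[str, Set[str]], entrypoints: Set[str], max_depth: int = 6) -> Set[str]:
--     """Traverse callers up to max_depth and collect entrypoints."""
--     found: Set[str] = set()
--     q = deque([(target, 0)])
--     seen = {target}
--     while q:
--         node, depth = q.popleft()
--         if depth > max_depth:
--             continue
--         for caller in rev_graph.get(node, set()):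
--             if caller in entrypoints:
--                 found.add(caller)
--             if caller not in seen:
--                 seen.add(caller)
--                 q.append((caller, depth + 1))
--     return found
-- ===== SOURCE B (Python) =====
-- def entrypoints_reaching(target, rev_graph, entrypoints, max_depth=6):
--     """Two-stage computation: first grow the set of nodes reachable from target
--     within max_depth reverse steps by repeated one-step expansion to a fixed point,
--     then make a separate pass collecting callers of reachable nodes that are
--     entrypoints."""
--     if max_depth < 0:
--         return set()
--     reach = {target}
--     order = [target]              # deterministic iteration order for reach
--     for _ in range(max_depth):
--         added = False
--         for node in list(order):
--             for caller in rev_graph.get(node, set()):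
--                 if caller not in reach:
--                     reach.add(caller)
--                     order.append(caller)
--                     added = True
--         if not added:
--             break
--     found = set()
--     for node in order:
--         for caller in rev_graph.get(node, set()):
--             if caller in entrypoints:
--                 found.add(caller)
--     return found
-- ===== Notes on version B (the rewrite author's own statement) =====
-- stated objective: alternative
-- what changed: Replaced the depth-tagged BFS worklist (deque of (node, depth) pairs interleaving discovery with entrypoint collection) by a two-stage computation: repeated one-step expansion of the reachable set to a fixed point (at most max_depth rounds), followed by a separate collection pass over the reachable nodes' callers intersected with entrypoints.
import Mathlib
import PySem

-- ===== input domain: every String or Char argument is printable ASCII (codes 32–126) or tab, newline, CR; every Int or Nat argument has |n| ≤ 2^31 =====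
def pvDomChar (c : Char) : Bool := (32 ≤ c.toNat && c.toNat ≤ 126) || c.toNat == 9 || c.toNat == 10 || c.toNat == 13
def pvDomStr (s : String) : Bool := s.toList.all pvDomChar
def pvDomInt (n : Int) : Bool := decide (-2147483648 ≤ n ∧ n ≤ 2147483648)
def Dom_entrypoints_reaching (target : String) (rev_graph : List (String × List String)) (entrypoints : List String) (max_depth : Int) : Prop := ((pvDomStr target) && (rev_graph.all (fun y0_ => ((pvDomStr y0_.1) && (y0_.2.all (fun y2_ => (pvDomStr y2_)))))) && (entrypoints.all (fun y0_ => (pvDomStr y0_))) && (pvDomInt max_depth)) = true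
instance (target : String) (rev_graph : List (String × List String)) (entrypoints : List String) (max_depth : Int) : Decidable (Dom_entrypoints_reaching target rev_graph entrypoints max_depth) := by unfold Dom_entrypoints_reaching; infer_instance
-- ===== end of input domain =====

-- B replaces A's depth-tagged BFS worklist by a two-stage computation (fixed-point
-- expansion of the reachable set, then a separate collection pass); same result,
-- similar cost ("alternative", not claimed faster).

-- ===== PORT A =====
-- multiset of all callers appearing in the graph: every node ever enqueued (except the
-- target) comes from here; used only for the termination measure of A's while-loop
def pvUniv (rev_graph : List (String × List String)) : List String :=
  (rev_graph.map Prod.snd).flatten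

def pvMeasure (rev_graph : List (String × List String)) (q : List (String × Int))
    (seen : PySem.Set String) : Nat :=
  ((pvUniv rev_graph).filter (fun x => !(PySem.Set.contains seen x))).length + q.length

-- body of A's inner 'for caller in rev_graph.get(node, set())' loop; state (found, seen, q)
def pvAStep (entrypoints : List String) (depth : Int)
    (st : PySem.Set String × PySem.Set String × List (String × Int)) (caller : String) :
    PySem.Set String × PySem.Set String × List (String × Int) :=
  let found := if PySem.Set.contains entrypoints caller then PySem.Set.add st.1 caller else st.1
  if PySem.Set.contains st.2.1 caller then (found, st.2.1, st.2.2)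
  else (found, PySem.Set.add st.2.1 caller, st.2.2 ++ [(caller, depth + 1)])

lemma pvAStep_measure (rev_graph : List (String × List String)) (entrypoints : List String)
    (depth : Int) (callers : List String) (h : ∀ c ∈ callers, c ∈ pvUniv rev_graph) :
    ∀ found seen q,
      pvMeasure rev_graph (callers.foldl (pvAStep entrypoints depth) (found, seen, q)).2.2
        (callers.foldl (pvAStep entrypoints depth) (found, seen, q)).2.1
      ≤ pvMeasure rev_graph q seen := by
  induction callers with
  | nil => intro f s q; simp
  | cons c cs ih =>
    intro f s q
    have hc : c ∈ pvUniv rev_graph := h c (by simp)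
    have h' : ∀ x ∈ cs, x ∈ pvUniv rev_graph := fun x hx => h x (by simp [hx])
    simp only [List.foldl_cons]
    rcases hstep : pvAStep entrypoints depth (f, s, q) c with ⟨f1, s1, q1⟩
    refine le_trans (ih h' f1 s1 q1) ?_
    simp only [pvAStep] at hstep
    by_cases hs : PySem.Set.contains s c = true
    · rw [if_pos hs] at hstep
      cases hstep
      exact le_refl _
    · rw [if_neg hs] at hstep
      cases hstep
      have hns : c ∉ s := by simpa [List.contains_iff_mem] using hs
      have hadd : PySem.Set.add s c = s ++ [c] := by simp [PySem.Set.add, hns]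
      simp only [pvMeasure, hadd]
      have hfilter : ((pvUniv rev_graph).filter
            (fun x => !(PySem.Set.contains (s ++ [c]) x))).length
          < ((pvUniv rev_graph).filter (fun x => !(PySem.Set.contains s x))).length := by
        have hmem : c ∈ (pvUniv rev_graph).filter (fun x => !(PySem.Set.contains s x)) := by
          simp [List.mem_filter, hc, hns]
        have hsub : (pvUniv rev_graph).filter (fun x => !(PySem.Set.contains (s ++ [c]) x))
            = ((pvUniv rev_graph).filter (fun x => !(PySem.Set.contains s x))).filter
                (fun x => !(x == c)) := by
          rw [List.filter_filter]
          apply List.filter_congr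
          intro x _
          by_cases hx : x = c <;> simp [hx]
        rw [hsub]
        apply List.length_filter_lt_length_iff_exists.mpr
        exact ⟨c, hmem, by simp⟩
      simp only [List.length_append]
      simp only [List.length_cons, List.length_nil]
      omega

-- A's while-loop over the deque q of (node, depth) pairs
def pvALoop (rev_graph : List (String × List String)) (entrypoints : List String)
    (max_depth : Int) :
    List (String × Int) → PySem.Set String → PySem.Set String → PySem.Set String
  | [], _, found => found
  | (node, depth) :: q, seen, found =>
    if depth > max_depth then pvALoop rev_graph entrypoints max_depth q seen found
    else
      let callers := (PySem.Dict.mk rev_graph).getD node []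
      let st := callers.foldl (pvAStep entrypoints depth) (found, seen, q)
      pvALoop rev_graph entrypoints max_depth st.2.2 st.2.1 st.1
termination_by q seen _ => pvMeasure rev_graph q seen
decreasing_by
  · simp only [pvMeasure, List.length_cons]; omega
  · have hcallers : ∀ c ∈ (PySem.Dict.mk rev_graph).getD node [], c ∈ pvUniv rev_graph := by
      intro c hcmem
      have : ∃ l ∈ rev_graph.map Prod.snd, c ∈ l := by
        simp only [PySem.Dict.getD, PySem.Dict.get?] at hcmem
        rcases hfind : (rev_graph.find? (fun p => p.1 == node)) with _ | p
        · simp [hfind] at hcmem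
        · refine ⟨p.2, List.mem_map_of_mem (List.mem_of_find?_eq_some (by
            simpa [PySem.Dict.mk] using hfind)), ?_⟩
          simpa [PySem.Dict.mk, hfind] using hcmem
      simpa [pvUniv, List.mem_flatten] using this
    calc pvMeasure rev_graph _ _ ≤ pvMeasure rev_graph q seen :=
          pvAStep_measure rev_graph entrypoints depth _ hcallers found seen q
      _ < pvMeasure rev_graph ((node, depth) :: q) seen := by
          simp only [pvMeasure, List.length_cons]; omega

def entrypoints_reaching (target : String) (rev_graph : List (String × List String)) (entrypoints : List String) (max_depth : Int) : List String :=
  pvALoop rev_graph entrypoints max_depth [(target, 0)] (PySem.Set.ofList [target]) PySem.Set.empty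

-- ===== PORT B =====
-- Source B keeps the set 'reach' together with its insertion-order list 'order'; a
-- PySem.Set IS that distinct list in insertion order, so one value carries both.

-- inner 'for caller in rev_graph.get(node, set())' loop of one expansion round;
-- state (reach, added-flag)
def pvScan1 (rev_graph : List (String × List String)) (st : PySem.Set String × Bool)
    (node : String) : PySem.Set String × Bool :=
  ((PySem.Dict.mk rev_graph).getD node []).foldl
    (fun st c => if PySem.Set.contains st.1 c then st else (st.1 ++ [c], true)) st

-- one expansion round: scan a snapshot of the current reach list ('for node in list(order)')
def pvExpand (rev_graph : List (String × List String)) (reach : PySem.Set String) :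
    PySem.Set String × Bool :=
  reach.foldl (pvScan1 rev_graph) (reach, false)

-- 'for _ in range(max_depth)' with 'if not added: break'
def pvReachLoop (rev_graph : List (String × List String)) :
    Nat → PySem.Set String → PySem.Set String
  | 0, reach => reach
  | n + 1, reach =>
    let r := pvExpand rev_graph reach
    if r.2 then pvReachLoop rev_graph n r.1 else reach

-- 'if caller in entrypoints: found.add(caller)'
def pvFoundStep (entrypoints : List String) (f : PySem.Set String) (c : String) :
    PySem.Set String :=
  if PySem.Set.contains entrypoints c then PySem.Set.add f c else f

-- the final collection pass over the reachable nodes, from an accumulator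
def pvCollectFrom (rev_graph : List (String × List String)) (entrypoints : List String)
    (ns : List String) (f : PySem.Set String) : PySem.Set String :=
  ns.foldl (fun f node =>
    ((PySem.Dict.mk rev_graph).getD node []).foldl (pvFoundStep entrypoints) f) f

def pvCollect (rev_graph : List (String × List String)) (entrypoints : List String)
    (ns : List String) : PySem.Set String :=
  pvCollectFrom rev_graph entrypoints ns PySem.Set.empty

def entrypoints_reaching_alt (target : String) (rev_graph : List (String × List String)) (entrypoints : List String) (max_depth : Int) : List String :=
  if max_depth < 0 then []
  else pvCollect rev_graph entrypoints
    (pvReachLoop rev_graph max_depth.toNat (PySem.Set.ofList [target]))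

-- ===== PRECONDITION & SPEC =====
def Spec_entrypoints_reaching (target : String) (rev_graph : List (String × List String)) (entrypoints : List String) (max_depth : Int) (out : List String) : Prop := out = entrypoints_reaching_alt target rev_graph entrypoints max_depth
instance (target : String) (rev_graph : List (String × List String)) (entrypoints : List String) (max_depth : Int) (out : List String) : Decidable (Spec_entrypoints_reaching target rev_graph entrypoints max_depth out) := by unfold Spec_entrypoints_reaching; infer_instance

-- ===== CLAIM (what is proved, stated in full; the proofs are below) =====
def Claim_equal_entrypoints_reaching : Prop := ∀ (target : String) (rev_graph : List (String × List String)) (entrypoints : List String) (max_depth : Int), Dom_entrypoints_reaching target rev_graph entrypoints max_depth → Spec_entrypoints_reaching target rev_graph entrypoints max_depth (entrypoints_reaching target rev_graph entrypoints max_depth)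

-- ===== LEMMAS AND PROOFS =====

-- Proof-side intermediate: level-synchronized BFS (frontier per depth level).  A is
-- proved equal to it, and it in turn equal to B's closure-then-collect computation.

-- inner-loop body of the level BFS; state (found, seen, next_frontier)
def pvLvlStep (entrypoints : List String)
    (st : PySem.Set String × PySem.Set String × List String) (caller : String) :
    PySem.Set String × PySem.Set String × List String :=
  let found := if PySem.Set.contains entrypoints caller then PySem.Set.add st.1 caller else st.1
  if PySem.Set.contains st.2.1 caller then (found, st.2.1, st.2.2)
  else (found, PySem.Set.add st.2.1 caller, st.2.2 ++ [caller])

-- one level: process the whole frontier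
def pvLvlLevel (rev_graph : List (String × List String)) (entrypoints : List String)
    (st : PySem.Set String × PySem.Set String × List String) :
    PySem.Set String × PySem.Set String × List String :=
  st.2.2.foldl
    (fun acc node => ((PySem.Dict.mk rev_graph).getD node []).foldl (pvLvlStep entrypoints) acc)
    (st.1, st.2.1, [])

def pvLvlLoop (rev_graph : List (String × List String)) (entrypoints : List String)
    (max_depth : Int) (depth : Int)
    (st : PySem.Set String × PySem.Set String × List String) : PySem.Set String :=
  if h : st.2.2 ≠ [] ∧ depth ≤ max_depth then
    pvLvlLoop rev_graph entrypoints max_depth (depth + 1) (pvLvlLevel rev_graph entrypoints st)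
  else st.1
termination_by (max_depth + 1 - depth).toNat
decreasing_by omega

-- seen-evolution of scanning a list of nodes' callers (pure Set.add folding)
def pvSeenAfter (rev_graph : List (String × List String)) (ns : List String)
    (r : PySem.Set String) : PySem.Set String :=
  ns.foldl (fun r n => ((PySem.Dict.mk rev_graph).getD n []).foldl PySem.Set.add r) r

-- ---------- part 1: A = level BFS (queue order coincides with level order) ----------

-- the level BFS inner fold only appends to next_frontier: shifting its initial value out
lemma pvLvlStep_foldl_shift (entrypoints : List String) (cs : List String) :
    ∀ (f s : PySem.Set String) (nf : List String),
      cs.foldl (pvLvlStep entrypoints) (f, s, nf)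
      = ((cs.foldl (pvLvlStep entrypoints) (f, s, [])).1,
         (cs.foldl (pvLvlStep entrypoints) (f, s, [])).2.1,
         nf ++ (cs.foldl (pvLvlStep entrypoints) (f, s, [])).2.2) := by
  induction cs with
  | nil => intro f s nf; simp
  | cons c cs ih =>
    intro f s nf
    simp only [List.foldl_cons]
    by_cases hs : PySem.Set.contains s c = true
    · simp only [pvLvlStep, hs, if_true]
      rw [ih _ _ nf, ih _ _ ([] : List String)]
    · simp only [pvLvlStep, hs, Bool.false_eq_true, if_false, List.nil_append]
      rw [ih _ _ (nf ++ [c]), ih _ _ ([c] : List String), List.append_assoc]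

-- A's inner fold is the level fold with next_frontier tagged at depth+1 and appended to q
lemma pvAStep_foldl_eq (entrypoints : List String) (depth : Int) (cs : List String) :
    ∀ (f s : PySem.Set String) (q : List (String × Int)),
      cs.foldl (pvAStep entrypoints depth) (f, s, q)
      = ((cs.foldl (pvLvlStep entrypoints) (f, s, [])).1,
         (cs.foldl (pvLvlStep entrypoints) (f, s, [])).2.1,
         q ++ ((cs.foldl (pvLvlStep entrypoints) (f, s, [])).2.2).map (fun c => (c, depth + 1))) := by
  induction cs with
  | nil => intro f s q; simp
  | cons c cs ih =>
    intro f s q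
    simp only [List.foldl_cons]
    by_cases hs : PySem.Set.contains s c = true
    · simp only [pvAStep, pvLvlStep, hs, if_true]
      rw [ih]
    · simp only [pvAStep, pvLvlStep, hs, Bool.false_eq_true, if_false, List.nil_append]
      rw [ih, pvLvlStep_foldl_shift entrypoints cs _ _ ([c] : List String)]
      simp [List.append_assoc]

-- running A's queue through one whole level equals the pvLvlLevel-style fold
lemma pvALoop_level (rev_graph : List (String × List String)) (entrypoints : List String)
    (max_depth depth : Int) (hd : depth ≤ max_depth) (frontier : List String) :
    ∀ (nf : List String) (f s : PySem.Set String),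
      pvALoop rev_graph entrypoints max_depth
        (frontier.map (fun x => (x, depth)) ++ nf.map (fun x => (x, depth + 1))) s f
      = pvALoop rev_graph entrypoints max_depth
          (((frontier.foldl
              (fun acc node => ((PySem.Dict.mk rev_graph).getD node []).foldl (pvLvlStep entrypoints) acc)
              (f, s, nf)).2.2).map (fun x => (x, depth + 1)))
          (frontier.foldl
              (fun acc node => ((PySem.Dict.mk rev_graph).getD node []).foldl (pvLvlStep entrypoints) acc)
              (f, s, nf)).2.1
          (frontier.foldl
              (fun acc node => ((PySem.Dict.mk rev_graph).getD node []).foldl (pvLvlStep entrypoints) acc)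
              (f, s, nf)).1 := by
  induction frontier with
  | nil => intro nf f s; simp
  | cons node fr ih =>
    intro nf f s
    have hnotgt : ¬ depth > max_depth := by omega
    simp only [List.map_cons, List.cons_append, List.foldl_cons]
    rw [pvALoop.eq_def]
    simp only [hnotgt, if_false]
    rw [pvAStep_foldl_eq, pvLvlStep_foldl_shift entrypoints _ f s nf]
    have : (fr.map (fun x => (x, depth)) ++ nf.map (fun x => (x, depth + 1)))
        ++ (((PySem.Dict.mk rev_graph).getD node []).foldl (pvLvlStep entrypoints) (f, s, [])).2.2.map
            (fun c => (c, depth + 1))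
        = fr.map (fun x => (x, depth))
          ++ ((nf ++ (((PySem.Dict.mk rev_graph).getD node []).foldl (pvLvlStep entrypoints) (f, s, [])).2.2).map
              (fun x => (x, depth + 1))) := by
      simp [List.append_assoc]
    rw [this, ih]

-- once every queued node is deeper than max_depth, A's loop just drains the queue
lemma pvALoop_drain (rev_graph : List (String × List String)) (entrypoints : List String)
    (max_depth depth : Int) (hd : depth > max_depth) (l : List String) :
    ∀ (s f : PySem.Set String),
      pvALoop rev_graph entrypoints max_depth (l.map (fun x => (x, depth))) s f = f := by
  induction l with
  | nil =>
    intro s f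
    rw [List.map_nil, pvALoop.eq_def]
  | cons x l ih =>
    intro s f
    simp only [List.map_cons]
    rw [pvALoop.eq_def]
    simp only [hd, if_true]
    exact ih s f

lemma pvALoop_eq_pvLvlLoop (rev_graph : List (String × List String)) (entrypoints : List String)
    (max_depth : Int) (n : Nat) : ∀ (depth : Int), (max_depth + 1 - depth).toNat = n →
    ∀ (frontier : List String) (f s : PySem.Set String),
      pvALoop rev_graph entrypoints max_depth (frontier.map (fun x => (x, depth))) s f
      = pvLvlLoop rev_graph entrypoints max_depth depth (f, s, frontier) := by
  induction n with
  | zero =>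
    intro depth hdep frontier f s
    have hgt : depth > max_depth := by omega
    rw [pvALoop_drain rev_graph entrypoints max_depth depth hgt frontier s f,
      pvLvlLoop]
    rw [dif_neg (by simp; omega)]
  | succ n ih =>
    intro depth hdep frontier f s
    have hle : depth ≤ max_depth := by omega
    rcases heq : frontier with _ | ⟨node, fr⟩
    · rw [List.map_nil, pvALoop.eq_def, pvLvlLoop]
      rw [dif_neg (by simp)]
    · rw [pvLvlLoop, dif_pos (show _ ∧ _ from ⟨by simp, hle⟩)]
      have hlvl := pvALoop_level rev_graph entrypoints max_depth depth hle (node :: fr) [] f s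
      simp only [List.map_nil, List.append_nil] at hlvl
      rw [hlvl, ih (depth + 1) (by omega)]
      rfl

-- ---------- part 2: level BFS = fixed-point expansion + collection pass ----------

-- Set.add basics
lemma pv_set_add_of_mem {r : PySem.Set String} {c : String} (h : c ∈ r) :
    PySem.Set.add r c = r := by
  simp [PySem.Set.add, h]

lemma pv_set_add_of_not_mem {r : PySem.Set String} {c : String} (h : c ∉ r) :
    PySem.Set.add r c = r ++ [c] := by
  simp [PySem.Set.add, h]

lemma pv_prefix_foldl_add (cs : List String) :
    ∀ r : PySem.Set String, r <+: cs.foldl PySem.Set.add r := by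
  induction cs with
  | nil => intro r; exact List.prefix_rfl
  | cons c cs ih =>
    intro r
    simp only [List.foldl_cons]
    by_cases h : c ∈ r
    · rw [pv_set_add_of_mem h]; exact ih r
    · rw [pv_set_add_of_not_mem h]
      exact List.IsPrefix.trans (List.prefix_append r [c]) (ih (r ++ [c]))

lemma pv_prefix_seenAfter (g : List (String × List String)) (ns : List String) :
    ∀ r : PySem.Set String, r <+: pvSeenAfter g ns r := by
  induction ns with
  | nil => intro r; exact List.prefix_rfl
  | cons n ns ih =>
    intro r
    exact List.IsPrefix.trans (pv_prefix_foldl_add _ r) (ih _)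

lemma pv_mem_foldl_add_init {a : String} {r : PySem.Set String} (cs : List String)
    (h : a ∈ r) : a ∈ cs.foldl PySem.Set.add r :=
  (pv_prefix_foldl_add cs r).subset h

lemma pv_mem_foldl_add {c : String} (cs : List String) (r : PySem.Set String)
    (h : c ∈ cs) : c ∈ cs.foldl PySem.Set.add r := by
  induction cs generalizing r with
  | nil => cases h
  | cons d cs ih =>
    simp only [List.foldl_cons]
    rcases List.mem_cons.mp h with rfl | hmem
    · apply pv_mem_foldl_add_init
      by_cases hd : c ∈ r
      · rw [pv_set_add_of_mem hd]; exact hd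
      · rw [pv_set_add_of_not_mem hd]; simp
    · exact ih _ hmem

lemma pv_mem_seenAfter_init {a : String} {r : PySem.Set String}
    (g : List (String × List String)) (ns : List String) (h : a ∈ r) :
    a ∈ pvSeenAfter g ns r :=
  (pv_prefix_seenAfter g ns r).subset h

lemma pv_mem_seenAfter_of_caller {n c : String} (g : List (String × List String))
    (ns : List String) (r : PySem.Set String) (hn : n ∈ ns)
    (hc : c ∈ (PySem.Dict.mk g).getD n []) : c ∈ pvSeenAfter g ns r := by
  induction ns generalizing r with
  | nil => cases hn
  | cons m ns ih =>
    rcases List.mem_cons.mp hn with rfl | hmem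
    · exact pv_mem_seenAfter_init g ns (pv_mem_foldl_add _ _ hc)
    · exact ih _ hmem

lemma pv_foldl_add_closed {r : PySem.Set String} (cs : List String)
    (h : ∀ c ∈ cs, c ∈ r) : cs.foldl PySem.Set.add r = r := by
  induction cs with
  | nil => rfl
  | cons c cs ih =>
    simp only [List.foldl_cons]
    rw [pv_set_add_of_mem (h c (by simp))]
    exact ih (fun x hx => h x (by simp [hx]))

lemma pvSeenAfter_cons (g : List (String × List String)) (n : String) (ns : List String)
    (r : PySem.Set String) :
    pvSeenAfter g (n :: ns) r
      = pvSeenAfter g ns (((PySem.Dict.mk g).getD n []).foldl PySem.Set.add r) := rfl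

lemma pv_seenAfter_closed (g : List (String × List String)) (ns : List String)
    (r : PySem.Set String) (h : ∀ n ∈ ns, ∀ c ∈ (PySem.Dict.mk g).getD n [], c ∈ r) :
    pvSeenAfter g ns r = r := by
  induction ns with
  | nil => rfl
  | cons n ns ih =>
    rw [pvSeenAfter_cons, pv_foldl_add_closed _ (h n (by simp))]
    exact ih (fun m hm => h m (by simp [hm]))

lemma pv_seenAfter_append (g : List (String × List String)) (ns ms : List String)
    (r : PySem.Set String) :
    pvSeenAfter g (ns ++ ms) r = pvSeenAfter g ms (pvSeenAfter g ns r) := by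
  simp [pvSeenAfter, List.foldl_append]

lemma pv_collectFrom_append (g : List (String × List String)) (e : List String)
    (ns ms : List String) (f : PySem.Set String) :
    pvCollectFrom g e (ns ++ ms) f = pvCollectFrom g e ms (pvCollectFrom g e ns f) := by
  simp [pvCollectFrom, List.foldl_append]

-- decomposing the level BFS inner fold over one callers list
lemma pvLvlStep_foldl_decomp (e : List String) (cs : List String) :
    ∀ (F S : PySem.Set String) (nf : List String), ∃ δ : List String,
      cs.foldl (pvLvlStep e) (F, S, nf)
        = (cs.foldl (pvFoundStep e) F, S ++ δ, nf ++ δ)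
      ∧ cs.foldl PySem.Set.add S = S ++ δ := by
  induction cs with
  | nil => intro F S nf; exact ⟨[], by simp⟩
  | cons c cs ih =>
    intro F S nf
    simp only [List.foldl_cons]
    by_cases hs : c ∈ S
    · have hc : PySem.Set.contains S c = true := by
        simpa [List.contains_iff_mem] using hs
      have hstep : pvLvlStep e (F, S, nf) c = (pvFoundStep e F c, S, nf) := by
        simp [pvLvlStep, pvFoundStep, hs]
      rw [hstep, pv_set_add_of_mem hs]
      exact ih (pvFoundStep e F c) S nf
    · have hc : ¬ PySem.Set.contains S c = true := by
        simpa [List.contains_iff_mem] using hs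
      have hstep : pvLvlStep e (F, S, nf) c
          = (pvFoundStep e F c, S ++ [c], nf ++ [c]) := by
        simp [pvLvlStep, pvFoundStep, hs]
      rw [hstep, pv_set_add_of_not_mem hs]
      obtain ⟨δ, h1, h2⟩ := ih (pvFoundStep e F c) (S ++ [c]) (nf ++ [c])
      exact ⟨c :: δ, by rw [h1]; simp, by rw [h2]; simp⟩

-- decomposing the level BFS fold over a whole frontier
lemma pvLvl_scan_decomp (g : List (String × List String)) (e : List String)
    (ns : List String) :
    ∀ (F S : PySem.Set String) (nf : List String), ∃ δ : List String,
      ns.foldl (fun acc node =>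
          ((PySem.Dict.mk g).getD node []).foldl (pvLvlStep e) acc) (F, S, nf)
        = (pvCollectFrom g e ns F, S ++ δ, nf ++ δ)
      ∧ pvSeenAfter g ns S = S ++ δ := by
  induction ns with
  | nil => intro F S nf; exact ⟨[], by simp [pvCollectFrom, pvSeenAfter]⟩
  | cons n ns ih =>
    intro F S nf
    simp only [List.foldl_cons]
    obtain ⟨δ1, h1, h2⟩ :=
      pvLvlStep_foldl_decomp e ((PySem.Dict.mk g).getD n []) F S nf
    rw [h1]
    obtain ⟨δ2, h3, h4⟩ :=
      ih (((PySem.Dict.mk g).getD n []).foldl (pvFoundStep e) F) (S ++ δ1) (nf ++ δ1)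
    refine ⟨δ1 ++ δ2, ?_, ?_⟩
    · rw [h3]; simp [pvCollectFrom]
    · rw [pvSeenAfter_cons, h2, h4]; simp

-- the expansion round with its flag, in terms of pvSeenAfter
lemma pvScan1_foldl_eq (cs : List String) :
    ∀ (r : PySem.Set String) (b : Bool),
      cs.foldl (fun st c => if PySem.Set.contains st.1 c then st else (st.1 ++ [c], true)) (r, b)
        = (cs.foldl PySem.Set.add r,
           b || decide (cs.foldl PySem.Set.add r ≠ r)) := by
  induction cs with
  | nil => intro r b; simp
  | cons c cs ih =>
    intro r b
    simp only [List.foldl_cons]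
    by_cases hs : c ∈ r
    · have hc : PySem.Set.contains r c = true := by
        simpa [List.contains_iff_mem] using hs
      rw [if_pos hc]
      simp only [pv_set_add_of_mem hs]
      exact ih r b
    · have hc : ¬ PySem.Set.contains r c = true := by
        simpa [List.contains_iff_mem] using hs
      rw [if_neg hc]
      simp only [pv_set_add_of_not_mem hs]
      rw [ih]
      have hne : cs.foldl PySem.Set.add (r ++ [c]) ≠ r := by
        intro h
        have := (pv_prefix_foldl_add cs (r ++ [c])).length_le
        rw [h] at this
        simp at this
      simp [hne]

lemma pvScan_nodes_eq (g : List (String × List String)) (ns : List String) :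
    ∀ (r : PySem.Set String) (b : Bool),
      ns.foldl (pvScan1 g) (r, b)
        = (pvSeenAfter g ns r, b || decide (pvSeenAfter g ns r ≠ r)) := by
  induction ns with
  | nil => intro r b; simp [pvSeenAfter]
  | cons n ns ih =>
    intro r b
    simp only [List.foldl_cons]
    rw [show pvScan1 g (r, b) n
        = (((PySem.Dict.mk g).getD n []).foldl PySem.Set.add r,
           b || decide (((PySem.Dict.mk g).getD n []).foldl PySem.Set.add r ≠ r)) from
      pvScan1_foldl_eq _ r b]
    rw [ih]
    have hsa : pvSeenAfter g (n :: ns) r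
        = pvSeenAfter g ns (((PySem.Dict.mk g).getD n []).foldl PySem.Set.add r) := rfl
    rw [hsa]
    by_cases h1 : ((PySem.Dict.mk g).getD n []).foldl PySem.Set.add r = r
    · rw [h1]; simp
    · have hlt : r.length < (((PySem.Dict.mk g).getD n []).foldl PySem.Set.add r).length := by
        have hpre := pv_prefix_foldl_add ((PySem.Dict.mk g).getD n []) r
        have hle := hpre.length_le
        rcases lt_or_eq_of_le hle with h | h
        · exact h
        · exact absurd (hpre.eq_of_length h).symm h1
      have hne : pvSeenAfter g ns (((PySem.Dict.mk g).getD n []).foldl PySem.Set.add r) ≠ r := by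
        intro h
        have := (pv_prefix_seenAfter g ns
          (((PySem.Dict.mk g).getD n []).foldl PySem.Set.add r)).length_le
        rw [h] at this
        omega
      simp [h1, hne]

lemma pvExpand_eq (g : List (String × List String)) (S : PySem.Set String) :
    pvExpand g S = (pvSeenAfter g S S, decide (pvSeenAfter g S S ≠ S)) := by
  rw [pvExpand, pvScan_nodes_eq]
  simp

lemma pvReachLoop_stable (g : List (String × List String)) (S : PySem.Set String)
    (h : pvSeenAfter g S S = S) : ∀ n, pvReachLoop g n S = S := by
  intro n
  induction n with
  | zero => rfl
  | succ n ih =>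
    rw [pvReachLoop, pvExpand_eq, h]
    simp

-- main bridge: the level BFS from an invariant state computes B's collect-of-closure
lemma pvLvl_eq_closure (g : List (String × List String)) (e : List String)
    (max_depth : Int) (fuel : Nat) :
    ∀ (depth : Int) (F S : PySem.Set String) (fr P : List String),
      fuel = (max_depth - depth).toNat → depth ≤ max_depth →
      S = P ++ fr →
      (∀ n ∈ P, ∀ c ∈ (PySem.Dict.mk g).getD n [], c ∈ S) →
      F = pvCollectFrom g e P PySem.Set.empty →
      pvLvlLoop g e max_depth depth (F, S, fr)
        = pvCollect g e (pvReachLoop g fuel S) := by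
  induction fuel with
  | zero =>
    intro depth F S fr P hfuel hdep hS hclosed hF
    have hdm : depth = max_depth := by omega
    rcases eq_or_ne fr [] with hfr | hfr
    · subst hfr
      rw [pvLvlLoop, dif_neg (by simp)]
      rw [pvReachLoop]
      rw [hF, hS]
      simp [pvCollect]
    · rw [pvLvlLoop, dif_pos ⟨hfr, hdep⟩]
      obtain ⟨δ, h1, _⟩ := pvLvl_scan_decomp g e fr F S []
      rw [show pvLvlLevel g e (F, S, fr)
          = fr.foldl (fun acc node =>
              ((PySem.Dict.mk g).getD node []).foldl (pvLvlStep e) acc) (F, S, []) from rfl,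
        h1]
      rw [pvLvlLoop, dif_neg (by rintro ⟨-, h⟩; omega)]
      rw [pvReachLoop, hF, ← pv_collectFrom_append, ← hS]
      rfl
  | succ n ih =>
    intro depth F S fr P hfuel hdep hS hclosed hF
    have hsaP : pvSeenAfter g P S = S :=
      pv_seenAfter_closed g P S hclosed
    rcases eq_or_ne fr [] with hfr | hfr
    · subst hfr
      rw [pvLvlLoop, dif_neg (by simp)]
      have hstable : pvSeenAfter g S S = S := by
        have : S = P := by simpa using hS
        rw [this] at hsaP ⊢
        exact hsaP
      rw [pvReachLoop_stable g S hstable]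
      rw [hF, hS]
      simp [pvCollect]
    · rw [pvLvlLoop, dif_pos ⟨hfr, hdep⟩]
      obtain ⟨δ, h1, h2⟩ := pvLvl_scan_decomp g e fr F S []
      rw [show pvLvlLevel g e (F, S, fr)
          = fr.foldl (fun acc node =>
              ((PySem.Dict.mk g).getD node []).foldl (pvLvlStep e) acc) (F, S, []) from rfl,
        h1]
      simp only [List.nil_append]
      have hSS : pvSeenAfter g S S = S ++ δ := by
        rw [hS, pv_seenAfter_append, ← hS, hsaP]
        exact h2
      rcases eq_or_ne δ [] with hδ | hδ
      · -- nothing new: both sides stop with collect over S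
        subst hδ
        have hstable : pvSeenAfter g S S = S := by simpa using hSS
        rw [pvReachLoop_stable g S hstable]
        rw [pvLvlLoop, dif_neg (by simp)]
        rw [hF, ← pv_collectFrom_append, ← hS]
        simp [pvCollect]
      · -- something new: both sides take one more round
        have hne2 : S ++ δ ≠ S := by
          intro h
          have hlen := congrArg List.length h
          rw [List.length_append] at hlen
          have hz : δ.length = 0 := by omega
          exact hδ (List.eq_nil_of_length_eq_zero hz)
        have hflag : decide (pvSeenAfter g S S ≠ S) = true := by
          rw [hSS]
          simpa using hne2
        rw [pvReachLoop]
        simp only [pvExpand_eq, hflag, if_true]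
        rw [hSS]
        exact ih (depth + 1)
          (pvCollectFrom g e fr F) (S ++ δ) δ S
          (by omega) (by omega) rfl
          (by
            intro m hm c hc
            rw [hS] at hm
            rcases List.mem_append.mp hm with hmP | hmfr
            · exact List.mem_append.mpr (Or.inl (hclosed m hmP c hc))
            · rw [← h2]
              exact pv_mem_seenAfter_of_caller g fr S hmfr hc)
          (by rw [hF, ← pv_collectFrom_append, ← hS])

-- ===== VERDICT (by name: the statement is the Claim_ definition above) =====
theorem entrypoints_reaching_spec : Claim_equal_entrypoints_reaching := by
  intro target rev_graph entrypoints max_depth _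
  unfold Spec_entrypoints_reaching entrypoints_reaching entrypoints_reaching_alt
  have h0 : ([(target, (0 : Int))] : List (String × Int))
      = [target].map (fun x => (x, (0 : Int))) := by simp
  rw [h0, pvALoop_eq_pvLvlLoop rev_graph entrypoints max_depth (max_depth + 1 - 0).toNat 0
    rfl [target] PySem.Set.empty (PySem.Set.ofList [target])]
  by_cases hmd : max_depth < 0
  · rw [if_pos hmd, pvLvlLoop, dif_neg (by rintro ⟨-, h⟩; omega)]
    rfl
  · rw [if_neg hmd]
    have hofl : PySem.Set.ofList [target] = [target] := by
      simp [PySem.Set.ofList]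
    rw [hofl]
    exact pvLvl_eq_closure rev_graph entrypoints max_depth max_depth.toNat 0
      PySem.Set.empty [target] [target] []
      (by omega) (by omega) rfl (by simp) rfl
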